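-- pv_equiv track=rewrite | github.com/15628925702/DermAgent | skills/specialists/ack_scc_specialist.py | _count_keyword_hits
-- ===== SOURCE A (Python) =====
-- from typing import Any, Dict, List
--
-- def _count_keyword_hits(cues: List[str], keywords: List[str]) -> int:
--     hits = 0
--     for cue in cues:
--         cue_lower = cue.lower()
--         for kw in keywords:
--             if kw in cue_lower:
--                 hits += 1
--                 break
--     return hits
-- ===== SOURCE B (Python) =====
-- from typing import List
--
-- def _count_keyword_hits(cues: List[str], keywords: List[str]) -> int:
--     # keyword-major: each keyword eliminates the cues it hits; the survivors are the misses
--     misses = [cue.lower() for cue in cues]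
--     for kw in keywords:
--         misses = [low for low in misses if kw not in low]
--     return len(cues) - len(misses)
-- ===== Notes on version B (the rewrite author's own statement) =====
-- stated objective: alternative
-- what changed: B inverts the loop nesting: instead of A's cue-major accumulator loop scanning keywords with a break, B lowers all cues once, then lets each keyword filter out the cues it hits, and returns len(cues) minus the surviving misses.
import Mathlib
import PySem

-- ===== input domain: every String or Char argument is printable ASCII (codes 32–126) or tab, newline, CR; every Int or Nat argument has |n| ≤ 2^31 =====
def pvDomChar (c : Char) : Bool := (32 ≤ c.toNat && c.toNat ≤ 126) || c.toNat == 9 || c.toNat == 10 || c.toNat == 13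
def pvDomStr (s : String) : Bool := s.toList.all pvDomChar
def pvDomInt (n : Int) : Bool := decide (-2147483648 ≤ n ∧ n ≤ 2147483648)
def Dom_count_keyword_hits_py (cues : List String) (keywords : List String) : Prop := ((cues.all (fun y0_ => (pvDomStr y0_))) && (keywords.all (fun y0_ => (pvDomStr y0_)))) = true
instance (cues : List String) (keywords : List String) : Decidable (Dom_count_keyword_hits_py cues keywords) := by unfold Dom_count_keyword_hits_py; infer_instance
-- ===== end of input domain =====

-- B inverts the loop nesting: it lowers all cues once, lets each keyword filter out the cues
-- it hits, and returns len(cues) minus the surviving misses (alternative structure, same results).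

-- ===== PORT A =====
-- inner 'for kw in keywords: if kw in cue_lower: hits += 1; break' as a helper returning
-- whether the break fired (then the caller adds 1)
def pvInnerA (keywords : List String) (cueLower : List Char) : Bool :=
  match keywords with
  | [] => false
  | kw :: rest =>
    if PySem.Chars.isIn kw.toList cueLower then true else pvInnerA rest cueLower

def count_keyword_hits_py (cues : List String) (keywords : List String) : Int :=
  cues.foldl (fun hits cue =>
    if pvInnerA keywords (PySem.Chars.lower cue.toList) then hits + 1 else hits) 0

-- ===== PORT B =====
-- Source B: misses = [cue.lower() ...]; for kw: misses = [low for low in misses if kw not in low];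
-- return len(cues) - len(misses)
def count_keyword_hits_py_alt (cues : List String) (keywords : List String) : Int :=
  let misses0 := cues.map (fun cue => PySem.Chars.lower cue.toList)
  let misses := keywords.foldl
    (fun ms kw => ms.filter (fun low => !(PySem.Chars.isIn kw.toList low))) misses0
  (cues.length : Int) - (misses.length : Int)

-- ===== PRECONDITION & SPEC =====
def Spec_count_keyword_hits_py (cues : List String) (keywords : List String) (out : Int) : Prop := out = count_keyword_hits_py_alt cues keywords
instance (cues : List String) (keywords : List String) (out : Int) : Decidable (Spec_count_keyword_hits_py cues keywords out) := by unfold Spec_count_keyword_hits_py; infer_instance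

-- ===== CLAIM (what is proved, stated in full; the proofs are below) =====
def Claim_equal_count_keyword_hits_py : Prop := ∀ (cues : List String) (keywords : List String), Dom_count_keyword_hits_py cues keywords → Spec_count_keyword_hits_py cues keywords (count_keyword_hits_py cues keywords)

-- ===== LEMMAS AND PROOFS =====

-- A's inner loop fires iff some keyword occurs in the lowered cue
theorem pvInnerA_eq_any (keywords : List String) (cl : List Char) :
    pvInnerA keywords cl = keywords.any (fun kw => PySem.Chars.isIn kw.toList cl) := by
  induction keywords with
  | nil => simp [pvInnerA]
  | cons kw rest ih =>
    simp only [pvInnerA, List.any_cons, ih]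
    by_cases h : PySem.Chars.isIn kw.toList cl = true <;> simp [h]

-- Source B's keyword-major filter loop, flattened: the surviving misses are exactly the
-- lowered cues no processed keyword occurs in
theorem pvFoldlFilter (keywords : List String) (ms : List (List Char)) :
    keywords.foldl (fun ms kw => ms.filter (fun low => !(PySem.Chars.isIn kw.toList low))) ms
      = ms.filter (fun low => keywords.all (fun kw => !(PySem.Chars.isIn kw.toList low))) := by
  induction keywords generalizing ms with
  | nil => simp
  | cons kw rest ih =>
    simp only [List.foldl_cons, ih, List.filter_filter, List.all_cons]
    congr 1
    funext a
    exact Bool.and_comm _ _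

-- ===== VERDICT (by name: the statement is the Claim_ definition above) =====
theorem count_keyword_hits_py_spec : Claim_equal_count_keyword_hits_py := by
  intro cues keywords _
  unfold Spec_count_keyword_hits_py count_keyword_hits_py count_keyword_hits_py_alt
  rw [PySem.List.foldl_count_if]
  simp only [zero_add]
  rw [show (fun (ms : List (List Char)) (kw : String) => List.filter (fun low => !PySem.Chars.isIn kw.toList low) ms) = fun ms kw => ms.filter (fun low => !(PySem.Chars.isIn kw.toList low)) from rfl]
  rw [pvFoldlFilter]
  rw [← List.countP_eq_length_filter]
  simp only [List.countP_map]
  have hcount : cues.countP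
      ((fun low => keywords.all fun kw => !PySem.Chars.isIn kw.toList low) ∘
        fun cue => PySem.Chars.lower cue.toList)
      = cues.length - cues.countP (fun cue => pvInnerA keywords (PySem.Chars.lower cue.toList)) := by
    rw [List.length_eq_countP_add_countP (fun cue => pvInnerA keywords (PySem.Chars.lower cue.toList))]
    have : cues.countP
        ((fun low => keywords.all fun kw => !PySem.Chars.isIn kw.toList low) ∘
          fun cue => PySem.Chars.lower cue.toList)
      = cues.countP (fun a => decide ¬(pvInnerA keywords (PySem.Chars.lower a.toList) = true)) := by
      apply List.countP_congr
      intro cue _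
      simp [pvInnerA_eq_any, Function.comp, List.all_eq_not_any_not]
    rw [this]
    omega
  rw [hcount]
  have hle : cues.countP (fun cue => pvInnerA keywords (PySem.Chars.lower cue.toList)) ≤ cues.length :=
    List.countP_le_length
  omega
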